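-- pv_equiv track=rewrite | github.com/misken/pymwts | pymwts/pymwtsio/mwts_makedat.py | num_consecutive_weekends
-- ===== SOURCE A (Python) =====
-- def is_weekend_worked(x, wkend_type, i):
--     """
--     Determine if i'th weekend is worked (full or half) for a given
--     weekend pattern x and weekend type,
--
--     :param x: list of 2-tuples representing weekend days worked. Each list
--             element is one week. The tuple of binary values represent the
--             first and second day of the weekend for that week. A 1 means
--             the day is worked, a 0 means it is off.
--     :param wkend_type: 1 --> weekend consists of Saturday and Sunday
--                        2 --> weekend consists of Friday and Saturday
--     :type wkend_type: int
--     :param i: which weekend to check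
--     :type i: int
--     :return: True if weekend i is worked, False otherwise
--
--     Example:
--         b = is_weekend_worked([(0,1),(1,0),(0,1),(1,0)],1,1)
--         # b = True
--
--         b = is_weekend_worked([(0,1),(1,0),(0,1),(1,0)],1,2)
--         # b = False
--
--         b = is_weekend_worked([(1,0),(1,0),(1,1),(1,0)],2,1)
--         # b = True
--
--         b = is_weekend_worked([(0,1),(1,0),(0,1),(0,0)],2,4)
--         # b = False
--
--     """
--     if wkend_type == 2:
--         if sum(x[i - 1]):
--             return True
--         else:
--             return False
--     else:
--         n_weeks = len(x)
--         if i < n_weeks: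
--             sunday_idx = i
--         else:
--             sunday_idx = 0
--
--         if (x[i - 1][1] + x[sunday_idx][0]) > 0:
--             return True
--         else:
--             return False
--
-- def num_consecutive_weekends(x, wkend_type, circular=True):
--     """
--     Returns largest number of consecutive weekends worked in a pattern.
--
--     :param x: list of 2-tuples representing weekend days worked. Each list
--             element is one week. The tuple of binary values represent the
--             first and second day of the weekend for that week. A 1 means
--             the day is worked, a 0 means it is off.
--     :param wkend_type: 1 --> weekend consists of Saturday and Sunday
--                        2 --> weekend consists of Friday and Saturday
--     :param circular: True  --> week n wraps to week 1
--                      False --> weeks do not wrap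
--     :return: Number of consecutive weekends worked
--
--     Example:
--         n = num_consecutive_weekends([(0,1),(1,0),(0,1),(1,0)],1)
--         # n = 1
--
--         n = num_consecutive_weekends([(0,1),(1,1),(0,1),(0,0)],1)
--         # n = 3
--
--         n = num_consecutive_weekends([(1,1),(1,0),(1,1),(1,0)],2)
--         # n = 4
--
--         n = num_consecutive_weekends([(0,1),(1,0),(0,1),(0,0)],2)
--         # n = 3
--
--     """
--
--     n = 0
--     n_consec = 0
--     if circular:
--         pattern = x + x
--     else:
--         pattern = x
--
--     n_weeks = len(pattern)
--     for i in range(1, n_weeks + 1):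
--         if is_weekend_worked(pattern, wkend_type, i):
--             n += 1
--             if n > n_consec:
--                 n_consec = n
--         else:
--             n = 0
--
--     return n_consec
-- ===== SOURCE B (Python) =====
-- from itertools import groupby
--
--
-- def is_weekend_worked(x, wkend_type, i):
--     if wkend_type == 2:
--         if sum(x[i - 1]):
--             return True
--         else:
--             return False
--     else:
--         n_weeks = len(x)
--         if i < n_weeks:
--             sunday_idx = i
--         else:
--             sunday_idx = 0
--
--         if (x[i - 1][1] + x[sunday_idx][0]) > 0:
--             return True
--         else:
--             return False
--
--
-- def num_consecutive_weekends(x, wkend_type, circular=True):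
--     pattern = x + x if circular else x
--     worked = [is_weekend_worked(pattern, wkend_type, i)
--               for i in range(1, len(pattern) + 1)]
--     return max((sum(1 for _ in g) for k, g in groupby(worked) if k), default=0)
-- ===== Notes on version B (the rewrite author's own statement) =====
-- stated objective: simpler
-- what changed: Replaces the manual counter/best-so-far loop with a declarative pipeline: build the boolean worked-list once, group it into runs with itertools.groupby, and take the max run length of worked runs (default=0).
import Mathlib
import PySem

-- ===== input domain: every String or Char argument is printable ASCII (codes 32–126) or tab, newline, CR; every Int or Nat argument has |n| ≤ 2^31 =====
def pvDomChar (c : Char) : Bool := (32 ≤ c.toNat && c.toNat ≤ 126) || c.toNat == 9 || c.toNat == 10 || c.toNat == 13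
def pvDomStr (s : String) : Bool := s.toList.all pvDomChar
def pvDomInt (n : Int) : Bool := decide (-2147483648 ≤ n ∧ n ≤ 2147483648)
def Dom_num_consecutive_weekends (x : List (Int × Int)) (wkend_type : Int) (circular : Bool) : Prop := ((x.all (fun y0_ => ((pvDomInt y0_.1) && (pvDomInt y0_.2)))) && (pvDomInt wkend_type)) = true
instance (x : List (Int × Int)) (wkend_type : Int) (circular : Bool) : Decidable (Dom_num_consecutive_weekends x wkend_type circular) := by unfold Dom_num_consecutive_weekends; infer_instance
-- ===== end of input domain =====

-- B replaces A's manual counter/best-so-far loop by a declarative pipeline (worked list, group into runs, max run length); objective: simpler.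

-- ===== PORT A =====
-- shared helper of the Python module (used by both A and B, as in the Python sources)
def is_weekend_worked (x : List (Int × Int)) (wkend_type : Int) (i : Int) : Bool :=
  if wkend_type == 2 then
    -- `if sum(x[i-1]):` — truthiness of an int sum is ≠ 0; index i-1 is in range at every call site
    match PySem.List.pyGet? x (i - 1) with
    | some p => p.1 + p.2 != 0
    | none => false
  else
    let n_weeks : Int := x.length
    let sunday_idx : Int := if i < n_weeks then i else 0
    match PySem.List.pyGet? x (i - 1), PySem.List.pyGet? x sunday_idx with
    | some p, some q => p.2 + q.1 > 0
    | _, _ => false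

def num_consecutive_weekends (x : List (Int × Int)) (wkend_type : Int) (circular : Bool) : Int :=
  let pattern := if circular then x ++ x else x
  let n_weeks : Int := pattern.length
  let st := (PySem.List.pyRange 1 (n_weeks + 1) 1).foldl
    (fun (st : Int × Int) i =>
      if is_weekend_worked pattern wkend_type i then
        (st.1 + 1, if st.1 + 1 > st.2 then st.1 + 1 else st.2)
      else
        (0, st.2)) (0, 0)
  st.2

-- ===== PORT B =====
-- itertools.groupby over a Bool list: list of (key, run length) pairs
def pvGroupRuns : List Bool → List (Bool × Int)
  | [] => []
  | b :: t =>
      (b, 1 + ((t.takeWhile (· == b)).length : Int)) :: pvGroupRuns (t.dropWhile (· == b))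
termination_by l => l.length
decreasing_by
  simpa using Nat.lt_succ_of_le (List.length_dropWhile_le (· == b) t)

def num_consecutive_weekends_alt (x : List (Int × Int)) (wkend_type : Int) (circular : Bool) : Int :=
  let pattern := if circular then x ++ x else x
  let worked := (PySem.List.pyRange 1 ((pattern.length : Int) + 1) 1).map
    (fun i => is_weekend_worked pattern wkend_type i)
  -- max((run length for k, g in groupby(worked) if k), default=0)
  (pvGroupRuns worked).foldl (fun m p => if p.1 then max m p.2 else m) 0

-- ===== PRECONDITION & SPEC =====
def Spec_num_consecutive_weekends (x : List (Int × Int)) (wkend_type : Int) (circular : Bool) (out : Int) : Prop := out = num_consecutive_weekends_alt x wkend_type circular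
instance (x : List (Int × Int)) (wkend_type : Int) (circular : Bool) (out : Int) : Decidable (Spec_num_consecutive_weekends x wkend_type circular out) := by unfold Spec_num_consecutive_weekends; infer_instance

-- ===== CLAIM (what is proved, stated in full; the proofs are below) =====
def Claim_equal_num_consecutive_weekends : Prop := ∀ (x : List (Int × Int)) (wkend_type : Int) (circular : Bool), Dom_num_consecutive_weekends x wkend_type circular → Spec_num_consecutive_weekends x wkend_type circular (num_consecutive_weekends x wkend_type circular)

-- ===== LEMMAS AND PROOFS =====

-- canonical "longest run of `true`s, with a run of length c already open" function
def pvLongest : Int → List Bool → Int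
  | c, [] => c
  | c, b :: t => if b then pvLongest (c + 1) t else max c (pvLongest 0 t)

theorem pvLongest_le (t : List Bool) : ∀ c : Int, c ≤ pvLongest c t := by
  induction t with
  | nil => intro c; simp [pvLongest]
  | cons b t ih =>
      intro c
      cases b
      · simp only [pvLongest]
        exact le_max_left _ _
      · simp only [pvLongest]
        exact le_trans (by omega) (ih (c + 1))

-- A's fold computes pvLongest
theorem pvFoldA (bs : List Bool) : ∀ c best : Int, 0 ≤ c → c ≤ best →
    (bs.foldl (fun (st : Int × Int) b =>
      if b then (st.1 + 1, if st.1 + 1 > st.2 then st.1 + 1 else st.2)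
      else (0, st.2)) (c, best)).2 = max best (pvLongest c bs) := by
  induction bs with
  | nil =>
      intro c best h0 h
      simp only [List.foldl_nil, pvLongest]
      rw [max_def]; split_ifs <;> omega
  | cons b t ih =>
      intro c best h0 h
      cases b
      · have hrec := ih 0 best (by omega) (by omega)
        have hle := pvLongest_le t (0 : Int)
        simp only [List.foldl_cons, Bool.false_eq_true, if_false, pvLongest, hrec]
        rw [max_def, max_def, max_def]; split_ifs <;> omega
      · have h1 : c + 1 ≤ if c + 1 > best then c + 1 else best := by split <;> omega
        have hrec := ih (c + 1) (if c + 1 > best then c + 1 else best) (by omega) h1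
        have hle := pvLongest_le t (c + 1)
        simp only [List.foldl_cons, if_true, pvLongest, hrec]
        rw [max_def, max_def]; split_ifs <;> omega

theorem pvLongest_trues (t : List Bool) : ∀ c : Int, 0 ≤ c →
    pvLongest c t = max (c + ((t.takeWhile (· == true)).length : Int))
      (pvLongest 0 (t.dropWhile (· == true))) := by
  induction t with
  | nil =>
      intro c h
      simp only [List.takeWhile_nil, List.dropWhile_nil, pvLongest, List.length_nil,
        Nat.cast_zero, add_zero]
      rw [max_def]; split_ifs <;> omega
  | cons b t ih =>
      intro c h
      cases b
      · have hle := pvLongest_le t (0 : Int)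
        rw [List.takeWhile_cons_of_neg (by decide), List.dropWhile_cons_of_neg (by decide)]
        simp only [pvLongest, Bool.false_eq_true, if_false, List.length_nil, Nat.cast_zero,
          add_zero]
        rw [max_def, max_def, max_def]; split_ifs <;> omega
      · have hrec := ih (c + 1) (by omega)
        rw [List.takeWhile_cons_of_pos (by decide), List.dropWhile_cons_of_pos (by decide)]
        simp only [pvLongest, if_true, List.length_cons, hrec]
        have hle := pvLongest_le (t.dropWhile (· == true)) (0 : Int)
        rw [max_def, max_def]; push_cast; split_ifs <;> omega

theorem pvLongest_drop_falses (t : List Bool) :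
    pvLongest 0 (t.dropWhile (· == false)) = pvLongest 0 t := by
  induction t with
  | nil => rfl
  | cons b t ih =>
      cases b
      · have hle := pvLongest_le t (0 : Int)
        rw [List.dropWhile_cons_of_pos (by decide), ih]
        simp only [pvLongest, Bool.false_eq_true, if_false]
        rw [max_def]; split_ifs <;> omega
      · rw [List.dropWhile_cons_of_neg (by decide)]

-- B's fold over the runs computes pvLongest
theorem pvFoldB : ∀ (n : Nat) (bs : List Bool), bs.length ≤ n → ∀ m : Int, 0 ≤ m →
    (pvGroupRuns bs).foldl (fun m p => if p.1 then max m p.2 else m) m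
      = max m (pvLongest 0 bs) := by
  intro n
  induction n with
  | zero =>
      intro bs hlen m hm
      have hnil : bs = [] := List.eq_nil_of_length_eq_zero (Nat.le_zero.mp hlen)
      subst hnil
      simp only [pvGroupRuns, List.foldl_nil, pvLongest]
      rw [max_def]; split_ifs <;> omega
  | succ n ih =>
      intro bs hlen m hm
      match bs with
      | [] =>
          simp only [pvGroupRuns, List.foldl_nil, pvLongest]
          rw [max_def]; split_ifs <;> omega
      | b :: t =>
          have hdrop : (t.dropWhile (· == b)).length ≤ n := by
            have := List.length_dropWhile_le (· == b) t
            simp only [List.length_cons] at hlen; omega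
          cases b
          · rw [pvGroupRuns]
            simp only [List.foldl_cons, Bool.false_eq_true, if_false]
            rw [ih _ hdrop _ hm, pvLongest_drop_falses]
            have hle := pvLongest_le t (0 : Int)
            simp only [pvLongest, Bool.false_eq_true, if_false]
            rw [max_def, max_def]; split_ifs <;> omega
          · rw [pvGroupRuns]
            simp only [List.foldl_cons, if_true]
            have hk : (0:Int) ≤ max m (1 + ((t.takeWhile (· == true)).length : Int)) := by
              have h01 : (0:Int) ≤ 1 + ((t.takeWhile (· == true)).length : Int) := by positivity
              rw [max_def]; split_ifs <;> omega
            rw [ih _ hdrop _ hk]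
            have h1 := pvLongest_trues t (1 : Int) (by omega)
            have hle := pvLongest_le (t.dropWhile (· == true)) (0 : Int)
            simp only [pvLongest, if_true, zero_add, h1]
            rw [max_def, max_def, max_def]; split_ifs <;> omega

-- ===== VERDICT (by name: the statement is the Claim_ definition above) =====
theorem num_consecutive_weekends_spec : Claim_equal_num_consecutive_weekends := by
  intro x wkend_type circular _
  unfold Spec_num_consecutive_weekends num_consecutive_weekends num_consecutive_weekends_alt
  set pattern := if circular then x ++ x else x with hp
  set bs := (PySem.List.pyRange 1 ((pattern.length : Int) + 1) 1).map
    (fun i => is_weekend_worked pattern wkend_type i) with hbs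
  have hA : ((PySem.List.pyRange 1 ((pattern.length : Int) + 1) 1).foldl
      (fun (st : Int × Int) i =>
        if is_weekend_worked pattern wkend_type i then
          (st.1 + 1, if st.1 + 1 > st.2 then st.1 + 1 else st.2)
        else (0, st.2)) (0, 0)).2
      = (bs.foldl (fun (st : Int × Int) b =>
          if b then (st.1 + 1, if st.1 + 1 > st.2 then st.1 + 1 else st.2)
          else (0, st.2)) (0, 0)).2 := by
    rw [hbs, List.foldl_map]
  simp only [hA]
  rw [pvFoldA bs 0 0 le_rfl le_rfl, pvFoldB bs.length bs le_rfl 0 le_rfl]
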